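-- pv_equiv track=rewrite | github.com/Ace1928/eidosian_forge | archive_forge/code/func_simplify_replacements.py | simplify_replacements
-- ===== SOURCE A (Python) =====
-- def simplify_replacements(replacements):
--     """
--     Simplify a list of replacement patterns to make sure there are no needless ones.
--
--     For instance in the sequence "Bert->BertNew, BertConfig->BertNewConfig, bert->bert_new", the replacement
--     "BertConfig->BertNewConfig" is implied by "Bert->BertNew" so not needed.
--
--     Args:
--         replacements (`List[Tuple[str, str]]`): List of patterns (old, new)
--
--     Returns:
--         `List[Tuple[str, str]]`: The list of patterns simplified.
--     """
--     if len(replacements) <= 1: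
--         return replacements
--     replacements.sort(key=lambda x: len(x[0]))
--     idx = 0
--     while idx < len(replacements):
--         old, new = replacements[idx]
--         j = idx + 1
--         while j < len(replacements):
--             old_2, new_2 = replacements[j]
--             if old_2.replace(old, new) == new_2:
--                 replacements.pop(j)
--             else:
--                 j += 1
--         idx += 1
--     return replacements
-- ===== SOURCE B (Python) =====
-- def simplify_replacements(replacements):
--     """Single forward pass: keep a pattern only if no already-kept pattern implies it."""
--     replacements.sort(key=lambda x: len(x[0]))
--     kept = []
--     for old_2, new_2 in replacements:
--         if not any(old_2.replace(old, new) == new_2 for old, new in kept):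
--             kept.append((old_2, new_2))
--     replacements[:] = kept
--     return replacements
-- ===== Notes on version B (the rewrite author's own statement) =====
-- stated objective: simpler
-- what changed: Replaces A's in-place nested while-loops with index bookkeeping and pop() by a single forward pass that appends a pattern to a survivor list only if no already-kept pattern implies it, then slice-assigns back.
import Mathlib
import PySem

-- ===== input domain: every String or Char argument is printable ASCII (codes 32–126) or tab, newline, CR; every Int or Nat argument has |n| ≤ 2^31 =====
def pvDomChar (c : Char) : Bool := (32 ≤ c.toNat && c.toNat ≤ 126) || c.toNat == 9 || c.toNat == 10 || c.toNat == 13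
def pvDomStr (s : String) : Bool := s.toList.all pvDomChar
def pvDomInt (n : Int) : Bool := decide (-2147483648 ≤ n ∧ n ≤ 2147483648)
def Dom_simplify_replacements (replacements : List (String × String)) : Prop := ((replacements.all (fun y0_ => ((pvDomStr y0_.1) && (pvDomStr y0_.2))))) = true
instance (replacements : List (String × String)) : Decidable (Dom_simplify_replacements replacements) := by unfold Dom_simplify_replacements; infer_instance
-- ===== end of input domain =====

-- B replaces A's nested while-loops with pop() by one forward pass over a survivor
-- accumulator (objective: simpler); both mutate the argument list the same way in
-- Python — the theorems here are about the return value.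

-- ===== PORT A =====
-- inner while loop: scan from idx+1, popping every pattern implied by (old, new)
def pvInnerA (old new : String) : List (String × String) → List (String × String)
  | [] => []
  | p :: rest =>
    if PySem.Str.replace p.1 old new = p.2 then pvInnerA old new rest
    else p :: pvInnerA old new rest

theorem pvInnerA_length_le (old new : String) (l : List (String × String)) :
    (pvInnerA old new l).length ≤ l.length := by
  induction l with
  | nil => simp [pvInnerA]
  | cons p rest ih => simp only [pvInnerA]; split <;> simp <;> omega

-- outer while loop over idx (the list shrinks behind idx via pops)
def pvOuterA : List (String × String) → List (String × String)
  | [] => []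
  | p :: rest => p :: pvOuterA (pvInnerA p.1 p.2 rest)
termination_by l => l.length
decreasing_by simpa using Nat.lt_succ_of_le (pvInnerA_length_le p.1 p.2 rest)

def simplify_replacements (replacements : List (String × String)) : List (String × String) :=
  if replacements.length ≤ 1 then replacements
  else pvOuterA (PySem.List.sorted replacements (fun x => PySem.Str.len x.1))

-- ===== PORT B =====
def simplify_replacements_alt (replacements : List (String × String)) : List (String × String) :=
  (PySem.List.sorted replacements (fun x => PySem.Str.len x.1)).foldl
    (fun kept p =>
      if kept.any (fun q => PySem.Str.replace p.1 q.1 q.2 == p.2) then kept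
      else kept ++ [p]) []

-- ===== PRECONDITION & SPEC =====
def Spec_simplify_replacements (replacements : List (String × String)) (out : List (String × String)) : Prop := out = simplify_replacements_alt replacements
instance (replacements : List (String × String)) (out : List (String × String)) : Decidable (Spec_simplify_replacements replacements out) := by unfold Spec_simplify_replacements; infer_instance

-- ===== CLAIM (what is proved, stated in full; the proofs are below) =====
def Claim_equal_simplify_replacements : Prop := ∀ (replacements : List (String × String)), Dom_simplify_replacements replacements → Spec_simplify_replacements replacements (simplify_replacements replacements)

-- ===== LEMMAS AND PROOFS =====

theorem pvInnerA_eq_filter (old new : String) (l : List (String × String)) :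
    pvInnerA old new l = l.filter (fun p => !(PySem.Str.replace p.1 old new == p.2)) := by
  induction l with
  | nil => simp [pvInnerA]
  | cons p rest ih =>
    simp only [pvInnerA, List.filter_cons]
    by_cases h : PySem.Str.replace p.1 old new = p.2 <;> simp [h, ih]

-- filtering by "no survivor in acc ++ [q] implies it" = filter by acc, then the inner pop loop for q
theorem pvFilter_snoc (q : String × String) (acc l : List (String × String)) :
    l.filter (fun p => !((acc ++ [q]).any fun r => PySem.Str.replace p.1 r.1 r.2 == p.2))
      = pvInnerA q.1 q.2 (l.filter (fun p => !(acc.any fun r => PySem.Str.replace p.1 r.1 r.2 == p.2))) := by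
  rw [pvInnerA_eq_filter, List.filter_filter]
  apply List.filter_congr
  intro p _
  simp [List.any_append, Bool.and_comm]

-- B's forward fold from survivors acc = acc ++ A's removal process on what acc has not killed
theorem pvFold_eq_outer (l acc : List (String × String)) :
    l.foldl (fun kept p =>
        if kept.any (fun q => PySem.Str.replace p.1 q.1 q.2 == p.2) then kept
        else kept ++ [p]) acc
      = acc ++ pvOuterA (l.filter (fun p => !(acc.any fun r => PySem.Str.replace p.1 r.1 r.2 == p.2))) := by
  induction l generalizing acc with
  | nil => simp [pvOuterA]
  | cons p rest ih =>
    simp only [List.foldl_cons, List.filter_cons]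
    by_cases h : acc.any (fun r => PySem.Str.replace p.1 r.1 r.2 == p.2) = true
    · simp [h, ih]
    · simp only [Bool.not_eq_true] at h
      simp only [h, Bool.not_false, if_true, Bool.false_eq_true, if_false]
      rw [ih, pvFilter_snoc, List.append_assoc]
      simp [pvOuterA]

theorem pvAlt_eq_outer (l : List (String × String)) :
    simplify_replacements_alt l = pvOuterA (PySem.List.sorted l (fun x => PySem.Str.len x.1)) := by
  rw [simplify_replacements_alt, pvFold_eq_outer]
  simp

-- ===== VERDICT (by name: the statement is the Claim_ definition above) =====
theorem simplify_replacements_spec : Claim_equal_simplify_replacements := by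
  intro l _
  show simplify_replacements l = simplify_replacements_alt l
  rw [pvAlt_eq_outer, simplify_replacements]
  split
  · rename_i h
    match l, h with
    | [], _ =>
      have hs : PySem.List.sorted ([] : List (String × String)) (fun x => PySem.Str.len x.1) = [] :=
        PySem.List.sorted_eq_self_of_pairwise _ _ (by simp)
      rw [hs]; simp [pvOuterA]
    | [p], _ =>
      have hs : PySem.List.sorted [p] (fun x => PySem.Str.len x.1) = [p] :=
        PySem.List.sorted_eq_self_of_pairwise _ _ (by simp)
      rw [hs]; simp [pvOuterA, pvInnerA]
  · rfl
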